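-- pv_equiv track=rewrite | github.com/CosmosWZJ/KattisProblems | 2048.py | zeroOut
-- ===== SOURCE A (Python) =====
-- def zeroOut(x, a = []):
--     if x == 0:
--         #move left
--         for i in range(4):
--             b = [0, 0, 0, 0]
--             index = 0
--             for j in range(4):
--                 if a[i][j] != 0:
--                     b[index] = a[i][j]
--                     index+=1
--             a[i] = b
--     if x == 2:
--         #move right
--         for i in range(4):
--             b = [0, 0, 0, 0]
--             index = 3
--             for j in range(3, -1, -1):
--                 if a[i][j] != 0:
--                     b[index] = a[i][j]
--                     index-=1
--             a[i] = b
--     if x == 1: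
--         #move up
--         for j in range(4):
--             b = [0, 0, 0, 0]
--             index = 0
--             for i in range(4):
--                 if a[i][j] != 0:
--                     b[index] = a[i][j]
--                     index += 1
--             for p in range(4):
--                 a[p][j] = b[p]
--     if x == 3:
--         #move down
--         for j in range(4):
--             b = [0, 0, 0, 0]
--             index = 3
--             for i in range(3, -1, -1):
--                 if a[i][j] != 0:
--                     b[index] = a[i][j]
--                     index -= 1
--             for p in range(4):
--                 a[p][j] = b[p]
--     return a
-- ===== SOURCE B (Python) =====
-- def zeroOut(x, a = []):
--     # Stable sort each line by the boolean key "is zero": since Python's sort is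
--     # stable and False < True, nonzeros keep their order and zeros sink to the end
--     # (or to the front, with the opposite key, for the right/down directions).
--     if x in (0, 1, 2, 3):
--         key = (lambda v: v != 0) if x in (2, 3) else (lambda v: v == 0)
--         if x in (0, 2):
--             for i in range(4):
--                 a[i] = sorted((a[i][j] for j in range(4)), key=key)
--         else:
--             for j in range(4):
--                 c = sorted((a[i][j] for i in range(4)), key=key)
--                 for p in range(4):
--                     a[p][j] = c[p]
--     return a
-- ===== Notes on version B (the rewrite author's own statement) =====
-- stated objective: alternative
-- what changed: A's four hand-unrolled compaction loops with b-buffer/index bookkeeping are replaced by a stable sort of each row/column under the boolean key 'is zero' (opposite key for right/down), which packs nonzeros while preserving their order.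
import Mathlib
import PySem

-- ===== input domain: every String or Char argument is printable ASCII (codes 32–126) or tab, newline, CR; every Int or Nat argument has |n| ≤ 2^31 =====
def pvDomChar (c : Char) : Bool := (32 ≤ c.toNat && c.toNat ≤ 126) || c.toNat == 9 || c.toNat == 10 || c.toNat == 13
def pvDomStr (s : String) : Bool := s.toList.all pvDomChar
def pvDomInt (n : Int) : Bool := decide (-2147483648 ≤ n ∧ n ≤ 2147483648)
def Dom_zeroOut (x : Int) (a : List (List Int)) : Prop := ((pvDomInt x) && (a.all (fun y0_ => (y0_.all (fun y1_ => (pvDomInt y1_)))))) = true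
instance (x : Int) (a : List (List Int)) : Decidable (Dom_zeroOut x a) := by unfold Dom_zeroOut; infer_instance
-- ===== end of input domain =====

-- B replaces A's four hand-unrolled b-buffer/index compaction loops by a stable sort of
-- each row/column under the boolean key "is zero" (objective: alternative algorithm).
-- Both Pythons mutate `a` in place identically; the equivalence proved is about the return value.

-- ===== PORT A =====
-- A's inner loop state (b, index), filling b with the nonzeros of the scanned values.
def packStepL (s : List Int × Nat) (v : Int) : List Int × Nat :=
  if v ≠ 0 then (s.1.set s.2 v, s.2 + 1) else s

def packL (vs : List Int) : List Int := (vs.foldl packStepL ([0, 0, 0, 0], 0)).1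

-- index counts down from 3 (Python's final decrement past 0 is never used, so Nat `-` is exact)
def packStepR (s : List Int × Nat) (v : Int) : List Int × Nat :=
  if v ≠ 0 then (s.1.set s.2 v, s.2 - 1) else s

def packR (vs : List Int) : List Int := (vs.foldl packStepR ([0, 0, 0, 0], 3)).1

-- a[i][j]; always in range under Pre_, so the getD default is never read there
def getA (a : List (List Int)) (i j : Nat) : Int := (a.getD i []).getD j 0

-- the write-back loop of A's x==1 / x==3 branches: for p in range(4): a[p][j] = b[p]
def writeCol (j : Nat) (b : List Int) (a : List (List Int)) : List (List Int) :=
  [0, 1, 2, 3].foldl (fun a p => a.set p ((a.getD p []).set j (b.getD p 0))) a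

def zeroOut (x : Int) (a : List (List Int)) : List (List Int) :=
  let a1 := if x = 0 then
      [0, 1, 2, 3].foldl
        (fun a i => a.set i (packL [getA a i 0, getA a i 1, getA a i 2, getA a i 3])) a
    else a
  let a2 := if x = 2 then
      [0, 1, 2, 3].foldl
        (fun a i => a.set i (packR [getA a i 3, getA a i 2, getA a i 1, getA a i 0])) a1
    else a1
  let a3 := if x = 1 then
      [0, 1, 2, 3].foldl
        (fun a j => writeCol j (packL [getA a 0 j, getA a 1 j, getA a 2 j, getA a 3 j]) a) a2
    else a2
  if x = 3 then
      [0, 1, 2, 3].foldl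
        (fun a j => writeCol j (packR [getA a 3 j, getA a 2 j, getA a 1 j, getA a 0 j]) a) a3
  else a3

-- ===== PORT B =====
-- Python booleans sort as the integers 0 < 1
def pykey (b : Bool) : Int := if b then 1 else 0

def zeroOut_alt (x : Int) (a : List (List Int)) : List (List Int) :=
  if x = 0 ∨ x = 1 ∨ x = 2 ∨ x = 3 then
    let key : Int → Int :=
      if x = 2 ∨ x = 3 then fun v => pykey (v != 0) else fun v => pykey (v == 0)
    if x = 0 ∨ x = 2 then
      [0, 1, 2, 3].foldl (fun a i =>
        a.set i (PySem.List.sorted ((List.range 4).map fun j => (a.getD i []).getD j 0) key false)) a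
    else
      [0, 1, 2, 3].foldl (fun a j =>
        let c := PySem.List.sorted ((List.range 4).map fun i => (a.getD i []).getD j 0) key false
        [0, 1, 2, 3].foldl (fun a p => a.set p ((a.getD p []).set j (c.getD p 0))) a) a
  else a

-- ===== PRECONDITION & SPEC =====
-- Pre_ excludes exactly the inputs where Python A raises IndexError: a direction x ∈ {0,1,2,3}
-- with fewer than 4 rows or one of the first 4 rows shorter than 4 cells.
def Pre_zeroOut (x : Int) (a : List (List Int)) : Prop :=
  (x = 0 ∨ x = 1 ∨ x = 2 ∨ x = 3) → (4 ≤ a.length ∧ ∀ r ∈ a.take 4, 4 ≤ r.length)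
instance (x : Int) (a : List (List Int)) : Decidable (Pre_zeroOut x a) := by
  unfold Pre_zeroOut; infer_instance

def pvWitness_zeroOut : Int × List (List Int) :=
  (0, [[0, 2, 0, 2], [1, 0, 0, 0], [0, 0, 0, 0], [1, 2, 3, 4]])

def Spec_zeroOut (x : Int) (a : List (List Int)) (out : List (List Int)) : Prop :=
  out = zeroOut_alt x a
instance (x : Int) (a : List (List Int)) (out : List (List Int)) : Decidable (Spec_zeroOut x a out) := by
  unfold Spec_zeroOut; infer_instance

-- ===== CLAIM (what is proved, stated in full; the proofs are below) =====
def Claim_equal_zeroOut : Prop := ∀ (x : Int) (a : List (List Int)),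
  Dom_zeroOut x a → Pre_zeroOut x a → Spec_zeroOut x a (zeroOut x a)

-- ===== LEMMAS AND PROOFS =====

-- A's left-packing loop over four values equals the stable sort under key "v == 0".
theorem sortZ_eq_packL (v0 v1 v2 v3 : Int) :
    PySem.List.sorted [v0, v1, v2, v3] (fun v => pykey (v == 0)) false
      = packL [v0, v1, v2, v3] := by
  by_cases h0 : v0 = 0 <;> by_cases h1 : v1 = 0 <;> by_cases h2 : v2 = 0 <;>
    by_cases h3 : v3 = 0 <;>
    simp [PySem.List.sorted, PySem.List.insertBy, pykey, packL, packStepL,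
      List.foldl, h0, h1, h2, h3, List.set]

-- A's right-packing loop over the reversed values equals the stable sort under key "v != 0".
theorem sortN_eq_packR (v0 v1 v2 v3 : Int) :
    PySem.List.sorted [v0, v1, v2, v3] (fun v => pykey (v != 0)) false
      = packR [v3, v2, v1, v0] := by
  by_cases h0 : v0 = 0 <;> by_cases h1 : v1 = 0 <;> by_cases h2 : v2 = 0 <;>
    by_cases h3 : v3 = 0 <;>
    simp [PySem.List.sorted, PySem.List.insertBy, pykey, packR, packStepR,
      List.foldl, h0, h1, h2, h3, List.set]

theorem foldl_ext {A B : Type} (f g : A -> B -> A) (h : forall a b, f a b = g a b) :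
    forall (l : List B) (a : A), List.foldl f a l = List.foldl g a l := by
  intro l
  induction l with
  | nil => intro a; rfl
  | cons b t ih => intro a; simp only [List.foldl, h, ih]

-- the two ports agree on every input (Pre_ only excludes Python-level IndexErrors)
theorem ports_eq (x : Int) (a : List (List Int)) : zeroOut x a = zeroOut_alt x a := by
  unfold zeroOut zeroOut_alt
  by_cases h0 : x = 0
  · subst h0
    simp only [show ((0 : Int) = 2) = False by simp, show ((0 : Int) = 1) = False by simp,
      show ((0 : Int) = 3) = False by simp, show ((0 : Int) = 0) = True by simp,
      if_true, if_false, true_or, or_self, or_false, false_or]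
    exact foldl_ext _ _ (fun a i => by
      simp only [getA, show List.range 4 = [0, 1, 2, 3] from rfl, List.map, sortZ_eq_packL]) _ _
  by_cases h2 : x = 2
  · subst h2
    simp only [show ((2 : Int) = 0) = False by simp, show ((2 : Int) = 1) = False by simp,
      show ((2 : Int) = 3) = False by simp, show ((2 : Int) = 2) = True by simp,
      if_true, if_false, true_or, or_self, or_false, false_or, or_true]
    exact foldl_ext _ _ (fun a i => by
      simp only [getA, show List.range 4 = [0, 1, 2, 3] from rfl, List.map, sortN_eq_packR]) _ _
  by_cases h1 : x = 1
  · subst h1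
    simp only [show ((1 : Int) = 0) = False by simp, show ((1 : Int) = 2) = False by simp,
      show ((1 : Int) = 3) = False by simp, show ((1 : Int) = 1) = True by simp,
      if_true, if_false, true_or, or_self, or_false, false_or, or_true]
    exact foldl_ext _ _ (fun a j => by
      simp only [writeCol, getA, show List.range 4 = [0, 1, 2, 3] from rfl, List.map,
        sortZ_eq_packL]) _ _
  by_cases h3 : x = 3
  · subst h3
    simp only [show ((3 : Int) = 0) = False by simp, show ((3 : Int) = 2) = False by simp,
      show ((3 : Int) = 1) = False by simp, show ((3 : Int) = 3) = True by simp,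
      if_true, if_false, true_or, or_self, or_false, false_or, or_true]
    exact foldl_ext _ _ (fun a j => by
      simp only [writeCol, getA, show List.range 4 = [0, 1, 2, 3] from rfl, List.map,
        sortN_eq_packR]) _ _
  · simp only [show (x = 0) = False by simp [h0], show (x = 2) = False by simp [h2],
      show (x = 1) = False by simp [h1], show (x = 3) = False by simp [h3],
      if_false, or_self]

-- ===== VERDICT (by name: the statement is the Claim_ definition above) =====
theorem zeroOut_spec : Claim_equal_zeroOut := by
  intro x a _ _
  unfold Spec_zeroOut
  exact ports_eq x a
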